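-- pv_equiv track=rewrite | github.com/Jellevanderwerff/rhythmic_universals_in_brain_network_organization | scripts/additional_measures/PS_measure.py | add_accents
-- ===== SOURCE A (Python) =====
-- def add_accents(binary_sequence: str):
--     """
--     See Povel & Essens (1985). 0 means silence, 1 means unaccented event, 2 means accented event.
--     """
--     output = []
--     count = 0
--
--     while count < len(binary_sequence):
--         # If there's three consecutive 1s:
--         if binary_sequence[count:count+3] == '111':
--             count += 3
--             output += '212'
--         # If there's two consecutive 1s:
--         elif binary_sequence[count:count+2] == '11':
--             count += 2
--             output += '12'
--         # If an event is isolated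
--         elif binary_sequence[count:count+3] == '010':
--             count += 3
--             output += '020'
--         # Otherwise, add the event to the output, and move on
--         else:
--             output += binary_sequence[count]
--             count += 1
--
--     return ''.join(output)
-- ===== SOURCE B (Python) =====
-- def add_accents(binary_sequence: str):
--     """
--     See Povel & Essens (1985). 0 means silence, 1 means unaccented event, 2 means accented event.
--
--     Three global left-to-right replacement passes. Equivalent to the greedy
--     scanner: '111' matches are exactly the leading triples of each maximal run
--     of 1s, a leftover '11' pair survives pass one untouched, and an isolated
--     '010' is disjoint from any 1-run rewriting, so pass order reproduces the
--     priority '111' > '11' > '010' of the scanner.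
--     """
--     return (binary_sequence
--             .replace('111', '212')
--             .replace('11', '12')
--             .replace('010', '020'))
-- ===== Notes on version B (the rewrite author's own statement) =====
-- stated objective: idiomatic
-- what changed: The index-based while-loop scanner with slice comparisons is replaced by three whole-string str.replace passes ('111'->'212', then '11'->'12', then '010'->'020'), proved to reproduce the scanner's greedy priority matching.
import Mathlib
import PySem

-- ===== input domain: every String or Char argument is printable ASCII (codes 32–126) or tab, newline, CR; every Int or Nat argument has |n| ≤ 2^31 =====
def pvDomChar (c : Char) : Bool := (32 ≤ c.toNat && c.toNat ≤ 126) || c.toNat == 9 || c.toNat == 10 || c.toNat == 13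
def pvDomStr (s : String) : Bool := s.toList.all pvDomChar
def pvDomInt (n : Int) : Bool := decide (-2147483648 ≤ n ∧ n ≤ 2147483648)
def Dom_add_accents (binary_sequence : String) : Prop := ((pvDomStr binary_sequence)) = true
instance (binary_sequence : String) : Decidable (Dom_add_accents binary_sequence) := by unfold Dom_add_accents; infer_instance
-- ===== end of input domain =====

-- A's while-loop scanner vs three whole-string replace passes; proved equal on all strings (return value only).


-- ===== PORT A =====
-- the while loop over `count`: recursing on the remaining suffix `binary_sequence[count:]`;
-- `binary_sequence[count:count+k]` is the suffix's `take k`, advancing `count += k` is `drop k`.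
def addAccentsGo : List Char → List Char
  | [] => []
  | c :: t =>
    if (c :: t).take 3 = ['1', '1', '1'] then '2' :: '1' :: '2' :: addAccentsGo ((c :: t).drop 3)
    else if (c :: t).take 2 = ['1', '1'] then '1' :: '2' :: addAccentsGo ((c :: t).drop 2)
    else if (c :: t).take 3 = ['0', '1', '0'] then '0' :: '2' :: '0' :: addAccentsGo ((c :: t).drop 3)
    else c :: addAccentsGo t
termination_by l => l.length
decreasing_by all_goals simp

def add_accents (binary_sequence : String) : String :=
  String.ofList (addAccentsGo binary_sequence.toList)

-- ===== PORT B =====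
def add_accents_alt (binary_sequence : String) : String :=
  PySem.Str.replace (PySem.Str.replace (PySem.Str.replace binary_sequence "111" "212") "11" "12") "010" "020"

-- ===== PRECONDITION & SPEC =====
def Spec_add_accents (binary_sequence : String) (out : String) : Prop := out = add_accents_alt binary_sequence
instance (binary_sequence : String) (out : String) : Decidable (Spec_add_accents binary_sequence out) := by unfold Spec_add_accents; infer_instance

-- ===== CLAIM (what is proved, stated in full; the proofs are below) =====
def Claim_equal_add_accents : Prop := ∀ (binary_sequence : String), Dom_add_accents binary_sequence → Spec_add_accents binary_sequence (add_accents binary_sequence)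

-- ===== LEMMAS AND PROOFS =====

-- run-to-completion form of PySem.Chars.replace (old ≠ []): accumulator-free
def repC (old new : List Char) (l : List Char) : List Char :=
  if h : old ≠ [] ∧ old <+: l then new ++ repC old new (l.drop old.length)
  else
    match l with
    | [] => []
    | c :: t => c :: repC old new t
termination_by l.length
decreasing_by
  · rcases h with ⟨hne, hp⟩
    have h1 : 1 ≤ old.length := List.length_pos_of_ne_nil hne
    have h2 : old.length ≤ l.length := hp.length_le
    simp; omega
  · simp

theorem repC_nil (old new : List Char) : repC old new [] = [] := by
  rw [repC]
  simp

theorem repC_pos (old new l : List Char) (hne : old ≠ []) (hp : old <+: l) :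
    repC old new l = new ++ repC old new (l.drop old.length) := by
  rw [repC]
  simp [hne, hp]

theorem repC_cons_neg (old new : List Char) (c : Char) (t : List Char)
    (h : ¬ old <+: (c :: t)) : repC old new (c :: t) = c :: repC old new t := by
  rw [repC]
  simp [h]

theorem replace_go_eq (old new : List Char) (hne : old ≠ []) :
    ∀ (fuel : Nat) (l acc : List Char), l.length ≤ fuel →
      PySem.Chars.replace.go old new fuel l acc = acc.reverse ++ repC old new l := by
  intro fuel
  induction fuel with
  | zero =>
    intro l acc hl
    have : l = [] := List.eq_nil_of_length_eq_zero (Nat.le_zero.mp hl)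
    subst this
    simp [PySem.Chars.replace.go, repC_nil]
  | succ n ih =>
    intro l acc hl
    match l with
    | [] => simp [PySem.Chars.replace.go, repC_nil]
    | c :: t =>
      rw [PySem.Chars.replace.go]
      by_cases hp : old <+: (c :: t)
      · have hpb : old.isPrefixOf (c :: t) = true := by
          rw [List.isPrefixOf_iff_prefix]; exact hp
        have h1 : 1 ≤ old.length := List.length_pos_of_ne_nil hne
        have hlen : ((c :: t).drop old.length).length ≤ n := by
          simp at hl ⊢; omega
        rw [if_pos hpb, ih _ _ hlen, repC_pos old new _ hne hp]
        simp
      · have hpb : old.isPrefixOf (c :: t) = false := by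
          rw [← Bool.not_eq_true, List.isPrefixOf_iff_prefix]; exact hp
        have hlen : t.length ≤ n := by simp at hl; omega
        rw [if_neg (by simp [hpb]), ih _ _ hlen, repC_cons_neg old new c t hp]
        simp


theorem replace_eq_repC (old new l : List Char) (h : old ≠ []) :
    PySem.Chars.replace l old new = repC old new l := by
  rw [PySem.Chars.replace, if_neg (by simp [h])]
  simpa using replace_go_eq old new h l.length l [] le_rfl

-- the three passes of B, on lists
def R3 (l : List Char) : List Char := repC ['1', '1', '1'] ['2', '1', '2'] l
def R2 (l : List Char) : List Char := repC ['1', '1'] ['1', '2'] l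
def R0 (l : List Char) : List Char := repC ['0', '1', '0'] ['0', '2', '0'] l

theorem R3_nil : R3 [] = [] := repC_nil _ _
theorem R2_nil : R2 [] = [] := repC_nil _ _
theorem R0_nil : R0 [] = [] := repC_nil _ _

theorem R3_cons (c : Char) (t : List Char) (h : c ≠ '1' ∨ ¬ ['1', '1'] <+: t) :
    R3 (c :: t) = c :: R3 t := by
  apply repC_cons_neg
  intro hp
  rw [List.cons_prefix_cons] at hp
  rcases h with h | h
  · exact h hp.1.symm
  · exact h hp.2

theorem R2_cons (c : Char) (t : List Char) (h : c ≠ '1' ∨ ¬ ['1'] <+: t) :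
    R2 (c :: t) = c :: R2 t := by
  apply repC_cons_neg
  intro hp
  rw [List.cons_prefix_cons] at hp
  rcases h with h | h
  · exact h hp.1.symm
  · exact h hp.2

theorem R0_cons (c : Char) (t : List Char) (h : c ≠ '0' ∨ ¬ ['1', '0'] <+: t) :
    R0 (c :: t) = c :: R0 t := by
  apply repC_cons_neg
  intro hp
  rw [List.cons_prefix_cons] at hp
  rcases h with h | h
  · exact h hp.1.symm
  · exact h hp.2

theorem R3_match (t : List Char) : R3 ('1' :: '1' :: '1' :: t) = '2' :: '1' :: '2' :: R3 t := by
  have := repC_pos ['1', '1', '1'] ['2', '1', '2'] ('1' :: '1' :: '1' :: t) (by simp) ⟨t, rfl⟩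
  simpa [R3] using this

theorem R2_match (t : List Char) : R2 ('1' :: '1' :: t) = '1' :: '2' :: R2 t := by
  have := repC_pos ['1', '1'] ['1', '2'] ('1' :: '1' :: t) (by simp) ⟨t, rfl⟩
  simpa [R2] using this

theorem R0_match (t : List Char) : R0 ('0' :: '1' :: '0' :: t) = '0' :: '2' :: '0' :: R0 t := by
  have := repC_pos ['0', '1', '0'] ['0', '2', '0'] ('0' :: '1' :: '0' :: t) (by simp) ⟨t, rfl⟩
  simpa [R0] using this

-- controlled one-step unfoldings of the scanner
theorem go_nil : addAccentsGo [] = [] := by rw [addAccentsGo]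

theorem go_111 (t : List Char) :
    addAccentsGo ('1' :: '1' :: '1' :: t) = '2' :: '1' :: '2' :: addAccentsGo t := by
  conv_lhs => rw [addAccentsGo.eq_def]
  simp

theorem go_11 (c : Char) (t : List Char) (h : c ≠ '1') :
    addAccentsGo ('1' :: '1' :: c :: t) = '1' :: '2' :: addAccentsGo (c :: t) := by
  conv_lhs => rw [addAccentsGo.eq_def]
  simp [h]

theorem go_11nil : addAccentsGo ['1', '1'] = ['1', '2'] := by
  conv_lhs => rw [addAccentsGo.eq_def]
  simp [go_nil]

theorem go_010 (t : List Char) :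
    addAccentsGo ('0' :: '1' :: '0' :: t) = '0' :: '2' :: '0' :: addAccentsGo t := by
  conv_lhs => rw [addAccentsGo.eq_def]
  simp

theorem go_1nil : addAccentsGo ['1'] = ['1'] := by
  conv_lhs => rw [addAccentsGo.eq_def]
  simp [go_nil]

theorem go_1 (c : Char) (t : List Char) (h : c ≠ '1') :
    addAccentsGo ('1' :: c :: t) = '1' :: addAccentsGo (c :: t) := by
  conv_lhs => rw [addAccentsGo.eq_def]
  simp [h]

theorem go_0 (c : Char) (t : List Char) (h : c ≠ '1') :
    addAccentsGo ('0' :: c :: t) = '0' :: addAccentsGo (c :: t) := by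
  conv_lhs => rw [addAccentsGo.eq_def]
  simp [h]

theorem go_0nil : addAccentsGo ['0'] = ['0'] := by
  conv_lhs => rw [addAccentsGo.eq_def]
  simp [go_nil]

theorem go_01 (c : Char) (t : List Char) (h : c ≠ '0') :
    addAccentsGo ('0' :: '1' :: c :: t) = '0' :: addAccentsGo ('1' :: c :: t) := by
  conv_lhs => rw [addAccentsGo.eq_def]
  simp [h]

theorem go_01nil : addAccentsGo ['0', '1'] = ['0', '1'] := by
  conv_lhs => rw [addAccentsGo.eq_def]
  simp [go_1nil]

theorem go_other (c : Char) (t : List Char) (h1 : c ≠ '1') (h0 : c ≠ '0') :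
    addAccentsGo (c :: t) = c :: addAccentsGo t := by
  conv_lhs => rw [addAccentsGo.eq_def]
  simp [h1, h0]

-- the scanner equals the composition of the three passes
theorem npre_a (a x : Char) (p t : List Char) (h : x ≠ a) : ¬ (a :: p) <+: (x :: t) := by
  rintro ⟨u, hu⟩
  simp at hu
  exact h hu.1.symm

theorem npre_b (a b x y : Char) (p t : List Char) (h : y ≠ b) :
    ¬ (a :: b :: p) <+: (x :: y :: t) := by
  rintro ⟨u, hu⟩
  simp at hu
  exact h hu.2.1.symm

theorem addAccentsGo_eq_passes :
    ∀ (n : Nat) (l : List Char), l.length ≤ n → addAccentsGo l = R0 (R2 (R3 l)) := by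
  intro n
  induction n with
  | zero =>
    intro l hl
    have hnil : l = [] := by cases l <;> simp_all
    subst hnil
    simp [go_nil, R3_nil, R2_nil, R0_nil]
  | succ n ih =>
    intro l hl
    rcases l with _ | ⟨c, t⟩
    · simp [go_nil, R3_nil, R2_nil, R0_nil]
    · by_cases hc1 : c = '1'
      · subst hc1
        rcases t with _ | ⟨c2, t2⟩
        · -- ['1']
          rw [go_1nil, R3_cons '1' [] (Or.inr (by simp)), R3_nil,
            R2_cons '1' [] (Or.inr (by simp)), R2_nil,
            R0_cons '1' [] (Or.inl (by decide)), R0_nil]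
        · by_cases hc2 : c2 = '1'
          · subst hc2
            rcases t2 with _ | ⟨c3, t3⟩
            · -- ['1','1']
              rw [go_11nil, R3_cons '1' ['1'] (Or.inr (by simp)),
                R3_cons '1' [] (Or.inr (by simp)), R3_nil, R2_match [], R2_nil,
                R0_cons '1' ['2'] (Or.inl (by decide)),
                R0_cons '2' [] (Or.inl (by decide)), R0_nil]
            · by_cases hc3 : c3 = '1'
              · -- '1','1','1' :: t3
                subst hc3
                rw [go_111, ih t3 (by simp at hl; omega), R3_match t3,
                  R2_cons '2' ('1' :: '2' :: R3 t3) (Or.inl (by decide)),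
                  R2_cons '1' ('2' :: R3 t3) (Or.inr (npre_a '1' '2' [] (R3 t3) (by decide))),
                  R2_cons '2' (R3 t3) (Or.inl (by decide)),
                  R0_cons '2' ('1' :: '2' :: R2 (R3 t3)) (Or.inl (by decide)),
                  R0_cons '1' ('2' :: R2 (R3 t3)) (Or.inl (by decide)),
                  R0_cons '2' (R2 (R3 t3)) (Or.inl (by decide))]
              · -- '1','1',c3 :: t3 with c3 ≠ '1'
                rw [go_11 c3 t3 hc3, ih (c3 :: t3) (by simp at hl ⊢; omega),
                  R3_cons '1' ('1' :: c3 :: t3) (Or.inr (npre_b '1' '1' '1' c3 [] t3 hc3)),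
                  R3_cons '1' (c3 :: t3) (Or.inr (npre_a '1' c3 ['1'] t3 hc3)),
                  R3_cons c3 t3 (Or.inl hc3), R2_match (c3 :: R3 t3),
                  R2_cons c3 (R3 t3) (Or.inl hc3),
                  R0_cons '1' ('2' :: c3 :: R2 (R3 t3)) (Or.inl (by decide)),
                  R0_cons '2' (c3 :: R2 (R3 t3)) (Or.inl (by decide))]
          · -- '1',c2 :: t2 with c2 ≠ '1'
            rw [go_1 c2 t2 hc2, ih (c2 :: t2) (by simp at hl ⊢; omega),
              R3_cons '1' (c2 :: t2) (Or.inr (npre_a '1' c2 ['1'] t2 hc2)),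
              R3_cons c2 t2 (Or.inl hc2),
              R2_cons '1' (c2 :: R3 t2) (Or.inr (npre_a '1' c2 [] (R3 t2) hc2)),
              R2_cons c2 (R3 t2) (Or.inl hc2),
              R0_cons '1' (c2 :: R2 (R3 t2)) (Or.inl (by decide))]
      · by_cases hc0 : c = '0'
        · subst hc0
          rcases t with _ | ⟨c2, t2⟩
          · -- ['0']
            rw [go_0nil, R3_cons '0' [] (Or.inl (by decide)), R3_nil,
              R2_cons '0' [] (Or.inl (by decide)), R2_nil,
              R0_cons '0' [] (Or.inr (by simp)), R0_nil]
          · by_cases hc2 : c2 = '1'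
            · subst hc2
              rcases t2 with _ | ⟨c3, t3⟩
              · -- ['0','1']
                rw [go_01nil, R3_cons '0' ['1'] (Or.inl (by decide)),
                  R3_cons '1' [] (Or.inr (by simp)), R3_nil,
                  R2_cons '0' ['1'] (Or.inl (by decide)),
                  R2_cons '1' [] (Or.inr (by simp)), R2_nil,
                  R0_cons '0' ['1'] (Or.inr (by simp)),
                  R0_cons '1' [] (Or.inl (by decide)), R0_nil]
              · by_cases hc3 : c3 = '0'
                · -- '0','1','0' :: t3
                  subst hc3
                  rw [go_010, ih t3 (by simp at hl; omega),
                    R3_cons '0' ('1' :: '0' :: t3) (Or.inl (by decide)),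
                    R3_cons '1' ('0' :: t3) (Or.inr (npre_a '1' '0' ['1'] t3 (by decide))),
                    R3_cons '0' t3 (Or.inl (by decide)),
                    R2_cons '0' ('1' :: '0' :: R3 t3) (Or.inl (by decide)),
                    R2_cons '1' ('0' :: R3 t3) (Or.inr (npre_a '1' '0' [] (R3 t3) (by decide))),
                    R2_cons '0' (R3 t3) (Or.inl (by decide)), R0_match (R2 (R3 t3))]
                · -- '0','1',c3 :: t3 with c3 ≠ '0'
                  by_cases hc31 : c3 = '1'
                  · subst hc31
                    rcases t3 with _ | ⟨c4, t4⟩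
                    · -- ['0','1','1']
                      rw [go_01 '1' [] hc3, go_11nil,
                        R3_cons '0' ['1', '1'] (Or.inl (by decide)),
                        R3_cons '1' ['1'] (Or.inr (by simp)),
                        R3_cons '1' [] (Or.inr (by simp)), R3_nil,
                        R2_cons '0' ['1', '1'] (Or.inl (by decide)), R2_match [], R2_nil,
                        R0_cons '0' ['1', '2'] (Or.inr (npre_b '1' '0' '1' '2' [] [] (by decide))),
                        R0_cons '1' ['2'] (Or.inl (by decide)),
                        R0_cons '2' [] (Or.inl (by decide)), R0_nil]
                    · by_cases hc4 : c4 = '1'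
                      · -- '0','1','1','1' :: t4
                        subst hc4
                        rw [go_01 '1' ('1' :: t4) hc3, go_111 t4, ih t4 (by simp at hl; omega),
                          R3_cons '0' ('1' :: '1' :: '1' :: t4) (Or.inl (by decide)), R3_match t4,
                          R2_cons '0' ('2' :: '1' :: '2' :: R3 t4) (Or.inl (by decide)),
                          R2_cons '2' ('1' :: '2' :: R3 t4) (Or.inl (by decide)),
                          R2_cons '1' ('2' :: R3 t4) (Or.inr (npre_a '1' '2' [] (R3 t4) (by decide))),
                          R2_cons '2' (R3 t4) (Or.inl (by decide)),
                          R0_cons '0' ('2' :: '1' :: '2' :: R2 (R3 t4))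
                            (Or.inr (npre_a '1' '2' ['0'] ('1' :: '2' :: R2 (R3 t4)) (by decide))),
                          R0_cons '2' ('1' :: '2' :: R2 (R3 t4)) (Or.inl (by decide)),
                          R0_cons '1' ('2' :: R2 (R3 t4)) (Or.inl (by decide)),
                          R0_cons '2' (R2 (R3 t4)) (Or.inl (by decide))]
                      · -- '0','1','1',c4 :: t4 with c4 ≠ '1'
                        rw [go_01 '1' (c4 :: t4) hc3, go_11 c4 t4 hc4,
                          ih (c4 :: t4) (by simp at hl ⊢; omega),
                          R3_cons '0' ('1' :: '1' :: c4 :: t4) (Or.inl (by decide)),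
                          R3_cons '1' ('1' :: c4 :: t4) (Or.inr (npre_b '1' '1' '1' c4 [] t4 hc4)),
                          R3_cons '1' (c4 :: t4) (Or.inr (npre_a '1' c4 ['1'] t4 hc4)),
                          R3_cons c4 t4 (Or.inl hc4),
                          R2_cons '0' ('1' :: '1' :: c4 :: R3 t4) (Or.inl (by decide)),
                          R2_match (c4 :: R3 t4), R2_cons c4 (R3 t4) (Or.inl hc4),
                          R0_cons '0' ('1' :: '2' :: c4 :: R2 (R3 t4))
                            (Or.inr (npre_b '1' '0' '1' '2' [] (c4 :: R2 (R3 t4)) (by decide))),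
                          R0_cons '1' ('2' :: c4 :: R2 (R3 t4)) (Or.inl (by decide)),
                          R0_cons '2' (c4 :: R2 (R3 t4)) (Or.inl (by decide))]
                  · -- '0','1',c3 :: t3 with c3 ∉ {'0','1'}
                    rw [go_01 c3 t3 hc3, go_1 c3 t3 hc31,
                      ih (c3 :: t3) (by simp at hl ⊢; omega),
                      R3_cons '0' ('1' :: c3 :: t3) (Or.inl (by decide)),
                      R3_cons '1' (c3 :: t3) (Or.inr (npre_a '1' c3 ['1'] t3 hc31)),
                      R3_cons c3 t3 (Or.inl hc31),
                      R2_cons '0' ('1' :: c3 :: R3 t3) (Or.inl (by decide)),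
                      R2_cons '1' (c3 :: R3 t3) (Or.inr (npre_a '1' c3 [] (R3 t3) hc31)),
                      R2_cons c3 (R3 t3) (Or.inl hc31),
                      R0_cons '0' ('1' :: c3 :: R2 (R3 t3))
                        (Or.inr (npre_b '1' '0' '1' c3 [] (R2 (R3 t3)) hc3)),
                      R0_cons '1' (c3 :: R2 (R3 t3)) (Or.inl (by decide))]
            · -- '0',c2 :: t2 with c2 ≠ '1'
              rw [go_0 c2 t2 hc2, ih (c2 :: t2) (by simp at hl ⊢; omega),
                R3_cons '0' (c2 :: t2) (Or.inl (by decide)),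
                R3_cons c2 t2 (Or.inl hc2),
                R2_cons '0' (c2 :: R3 t2) (Or.inl (by decide)),
                R2_cons c2 (R3 t2) (Or.inl hc2),
                R0_cons '0' (c2 :: R2 (R3 t2)) (Or.inr (npre_a '1' c2 ['0'] (R2 (R3 t2)) hc2))]
        · -- c ∉ {'0','1'}
          rw [go_other c t hc1 hc0, ih t (by simp at hl; omega),
            R3_cons c t (Or.inl hc1), R2_cons c (R3 t) (Or.inl hc1),
            R0_cons c (R2 (R3 t)) (Or.inl hc0)]

-- ===== VERDICT (by name: the statement is the Claim_ definition above) =====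
theorem add_accents_spec : Claim_equal_add_accents := by
  intro s _
  unfold Spec_add_accents add_accents add_accents_alt
  rw [PySem.Str.replace, PySem.Str.replace, PySem.Str.replace]
  simp only [String.toList_ofList]
  rw [show "111".toList = ['1', '1', '1'] from rfl, show "212".toList = ['2', '1', '2'] from rfl,
    show "11".toList = ['1', '1'] from rfl, show "12".toList = ['1', '2'] from rfl,
    show "010".toList = ['0', '1', '0'] from rfl, show "020".toList = ['0', '2', '0'] from rfl]
  rw [replace_eq_repC _ _ _ (by simp), replace_eq_repC _ _ _ (by simp),
    replace_eq_repC _ _ _ (by simp)]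
  rw [addAccentsGo_eq_passes s.toList.length s.toList le_rfl]
  rfl
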